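-- pv_equiv track=rewrite | github.com/jonathonreilly/toy-physics | scripts/frontier_s3_cap_link_formal.py | cubical_interior_vertices
-- ===== SOURCE A (Python) =====
-- def cubical_interior_vertices(sites_set: set) -> tuple[set, set]:
--     """
--     A vertex v is CUBICALLY INTERIOR if all 8 unit cubes sharing v exist.
--     This requires all 26 neighbors in the 3x3x3 block to be present.
--     """
--     cub_interior = set()
--     cub_boundary = set()
--     for v in sites_set:
--         x, y, z = v
--         all_present = True
--         for dx in (-1, 0, 1):
--             for dy in (-1, 0, 1):
--                 for dz in (-1, 0, 1):
--                     if dx == 0 and dy == 0 and dz == 0: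
--                         continue
--                     if (x+dx, y+dy, z+dz) not in sites_set:
--                         all_present = False
--                         break
--                 if not all_present:
--                     break
--             if not all_present:
--                 break
--         if all_present:
--             cub_interior.add(v)
--         else:
--             cub_boundary.add(v)
--     return cub_interior, cub_boundary
-- ===== SOURCE B (Python) =====
-- def cubical_interior_vertices(sites_set: set) -> tuple[set, set]:
--     """Offset-major classification: intersect 26 shifted copies of the set."""
--     offsets = [(dx, dy, dz)
--                for dx in (-1, 0, 1) for dy in (-1, 0, 1) for dz in (-1, 0, 1)
--                if (dx, dy, dz) != (0, 0, 0)]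
--     acc = set(sites_set)
--     for dx, dy, dz in offsets:
--         acc = {(x, y, z) for (x, y, z) in acc
--                if (x + dx, y + dy, z + dz) in sites_set}
--     cub_boundary = set(sites_set) - acc
--     return acc, cub_boundary
-- ===== Notes on version B (the rewrite author's own statement) =====
-- stated objective: alternative
-- what changed: Replaces the per-vertex triple-nested 26-neighbor scan with a break flag by an offset-major sweep: for each of the 26 offsets, filter the candidate set down to vertices whose shifted neighbor is present, then take the set difference for the boundary.
import Mathlib
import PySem

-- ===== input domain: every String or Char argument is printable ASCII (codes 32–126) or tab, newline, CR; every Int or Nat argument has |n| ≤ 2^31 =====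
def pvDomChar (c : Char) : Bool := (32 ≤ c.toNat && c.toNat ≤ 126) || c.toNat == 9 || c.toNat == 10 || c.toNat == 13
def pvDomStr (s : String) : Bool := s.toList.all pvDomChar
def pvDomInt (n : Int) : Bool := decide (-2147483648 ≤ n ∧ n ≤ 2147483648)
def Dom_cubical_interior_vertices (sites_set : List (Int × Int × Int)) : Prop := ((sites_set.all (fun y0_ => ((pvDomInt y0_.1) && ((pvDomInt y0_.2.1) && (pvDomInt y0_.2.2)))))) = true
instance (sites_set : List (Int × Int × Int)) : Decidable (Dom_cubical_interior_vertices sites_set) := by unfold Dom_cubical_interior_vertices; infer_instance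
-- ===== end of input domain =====

-- B replaces A's per-vertex 26-neighbor scan (nested loops with a break flag) by an
-- offset-major sweep: 26 whole-set filter passes plus one set difference. Alternative
-- decomposition, same asymptotic cost; neither version mutates its argument.

-- ===== PORT A =====
-- innermost 'for dz in (-1, 0, 1)' loop: returns all_present (false = the break fired)
def pvLoopDz (sites : List (Int × Int × Int)) (x y z dx dy : Int) : List Int → Bool
  | [] => true
  | dz :: rest =>
    if dx == 0 && dy == 0 && dz == 0 then pvLoopDz sites x y z dx dy rest
    else if !(sites.contains (x + dx, y + dy, z + dz)) then false
    else pvLoopDz sites x y z dx dy rest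

-- 'for dy in (-1, 0, 1)' loop with its 'if not all_present: break'
def pvLoopDy (sites : List (Int × Int × Int)) (x y z dx : Int) : List Int → Bool
  | [] => true
  | dy :: rest =>
    if pvLoopDz sites x y z dx dy [-1, 0, 1] then pvLoopDy sites x y z dx rest
    else false

-- 'for dx in (-1, 0, 1)' loop with its 'if not all_present: break'
def pvLoopDx (sites : List (Int × Int × Int)) (x y z : Int) : List Int → Bool
  | [] => true
  | dx :: rest =>
    if pvLoopDy sites x y z dx [-1, 0, 1] then pvLoopDx sites x y z rest
    else false

def cubical_interior_vertices (sites_set : List (Int × Int × Int)) :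
    (List (Int × Int × Int)) × (List (Int × Int × Int)) :=
  sites_set.foldl
    (fun acc v =>
      if pvLoopDx sites_set v.1 v.2.1 v.2.2 [-1, 0, 1] then
        (PySem.Set.add acc.1 v, acc.2)
      else
        (acc.1, PySem.Set.add acc.2 v))
    (PySem.Set.empty, PySem.Set.empty)

-- ===== PORT B =====
-- the 26-offset list comprehension
def pvOffsets : List (Int × Int × Int) :=
  ((([-1, 0, 1] : List Int).flatMap (fun dx =>
      (([-1, 0, 1] : List Int).flatMap (fun dy =>
        (([-1, 0, 1] : List Int).map (fun dz => (dx, dy, dz))))))).filter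
    (fun d => d ≠ ((0 : Int), (0 : Int), (0 : Int))))

def cubical_interior_vertices_alt (sites_set : List (Int × Int × Int)) :
    (List (Int × Int × Int)) × (List (Int × Int × Int)) :=
  let base := PySem.Set.ofList sites_set
  let acc := pvOffsets.foldl
    (fun acc d =>
      acc.filter (fun v =>
        sites_set.contains (v.1 + d.1, v.2.1 + d.2.1, v.2.2 + d.2.2)))
    base
  (acc, PySem.Set.diff base acc)

-- ===== PRECONDITION & SPEC =====
def Spec_cubical_interior_vertices (sites_set : List (Int × Int × Int)) (out : (List (Int × Int × Int)) × (List (Int × Int × Int))) : Prop := out = cubical_interior_vertices_alt sites_set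
instance (sites_set : List (Int × Int × Int)) (out : (List (Int × Int × Int)) × (List (Int × Int × Int))) : Decidable (Spec_cubical_interior_vertices sites_set out) := by unfold Spec_cubical_interior_vertices; infer_instance

-- ===== CLAIM (what is proved, stated in full; the proofs are below) =====
def Claim_equal_cubical_interior_vertices : Prop := ∀ (sites_set : List (Int × Int × Int)), Dom_cubical_interior_vertices sites_set → Spec_cubical_interior_vertices sites_set (cubical_interior_vertices sites_set)

-- ===== LEMMAS AND PROOFS =====

-- B's per-vertex predicate ("all 26 neighbors present"), used only by the proofs
def pvPred (sites : List (Int × Int × Int)) (v : Int × Int × Int) : Bool :=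
  pvOffsets.all (fun d => sites.contains (v.1 + d.1, v.2.1 + d.2.1, v.2.2 + d.2.2))

-- A's nested break-loops compute B's predicate (same 26 membership tests)
theorem pvLoop_eq_pred (s : List (Int × Int × Int)) (v : Int × Int × Int) :
    pvLoopDx s v.1 v.2.1 v.2.2 [-1, 0, 1] = pvPred s v := by
  have hofs : pvOffsets = [(-1,-1,-1),(-1,-1,0),(-1,-1,1),(-1,0,-1),(-1,0,0),(-1,0,1),(-1,1,-1),(-1,1,0),(-1,1,1),
    (0,-1,-1),(0,-1,0),(0,-1,1),(0,0,-1),(0,0,1),(0,1,-1),(0,1,0),(0,1,1),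
    (1,-1,-1),(1,-1,0),(1,-1,1),(1,0,-1),(1,0,0),(1,0,1),(1,1,-1),(1,1,0),(1,1,1)] := by decide
  simp only [pvLoopDx, pvLoopDy, pvLoopDz, pvPred, hofs, List.all_cons, List.all_nil]
  norm_num
  ac_rfl

-- the fold of 26 filters is one filter by the conjunction of the tests
theorem pvFoldFilter (q : (Int × Int × Int) → (Int × Int × Int) → Bool) :
    ∀ (ds : List (Int × Int × Int)) (a : List (Int × Int × Int)),
      ds.foldl (fun acc d => acc.filter (q d)) a
        = a.filter (fun v => ds.all (fun d => q d v)) := by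
  intro ds
  induction ds with
  | nil => intro a; simp
  | cons d ds ih =>
    intro a
    simp only [List.foldl_cons, ih, List.filter_filter, List.all_cons]
    exact List.filter_congr (fun v _ => by cases h : q d v <;> simp)

-- PySem.Set.add commutes with filter
theorem pvFilterAdd (p : (Int × Int × Int) → Bool) (j : List (Int × Int × Int))
    (v : Int × Int × Int) :
    (PySem.Set.add j v).filter p
      = if p v then PySem.Set.add (j.filter p) v else j.filter p := by
  simp only [PySem.Set.add, PySem.Set.contains]
  by_cases hj : v ∈ j
  · have hf : (List.filter p j).contains v = p v := by
      cases h : p v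
      · simp [List.mem_filter, h]
      · simp [List.mem_filter, hj, h]
    cases h : p v <;> simp [hj, hf, h]
  · have hf : (List.filter p j).contains v = false := by
      simp [List.mem_filter]; intro h; exact absurd h hj
    cases h : p v <;> simp [hj, hf, List.filter_append, h]

-- folding Set.add and then filtering = folding add-if-p
theorem pvFoldAddFilter (p : (Int × Int × Int) → Bool) :
    ∀ (l j : List (Int × Int × Int)),
      (l.foldl PySem.Set.add j).filter p
        = l.foldl (fun a v => if p v then PySem.Set.add a v else a) (j.filter p) := by
  intro l
  induction l with
  | nil => intro j; rfl
  | cons v l ih =>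
    intro j
    simp only [List.foldl_cons, ih, pvFilterAdd]

-- A's accumulator pair splits componentwise
theorem pvFoldSplit (p : (Int × Int × Int) → Bool) :
    ∀ (l : List (Int × Int × Int)) (i b : List (Int × Int × Int)),
      l.foldl (fun acc v => if p v then (PySem.Set.add acc.1 v, acc.2)
                            else (acc.1, PySem.Set.add acc.2 v)) (i, b)
        = (l.foldl (fun a v => if p v then PySem.Set.add a v else a) i,
           l.foldl (fun a v => if p v then a else PySem.Set.add a v) b) := by
  intro l
  induction l with
  | nil => intro i b; rfl
  | cons v l ih =>
    intro i b
    simp only [List.foldl_cons]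
    cases h : p v <;> simp only [h, if_pos, Bool.false_eq_true, ite_false] <;> exact ih _ _

-- the two ports, written out, are equal
theorem pvMainEq (s : List (Int × Int × Int)) :
    s.foldl
      (fun acc v =>
        if pvLoopDx s v.1 v.2.1 v.2.2 [-1, 0, 1] then (PySem.Set.add acc.1 v, acc.2)
        else (acc.1, PySem.Set.add acc.2 v))
      (PySem.Set.empty, PySem.Set.empty)
    = (let base := PySem.Set.ofList s
       let acc := pvOffsets.foldl
         (fun acc d =>
           acc.filter (fun v => s.contains (v.1 + d.1, v.2.1 + d.2.1, v.2.2 + d.2.2)))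
         base
       (acc, PySem.Set.diff base acc)) := by
  have hstep : (fun (acc : List (Int × Int × Int) × List (Int × Int × Int)) v =>
      if pvLoopDx s v.1 v.2.1 v.2.2 [-1, 0, 1] then (PySem.Set.add acc.1 v, acc.2)
      else (acc.1, PySem.Set.add acc.2 v))
      = (fun acc v => if pvPred s v then (PySem.Set.add acc.1 v, acc.2)
                      else (acc.1, PySem.Set.add acc.2 v)) := by
    funext acc v; rw [pvLoop_eq_pred]
  have hbase : PySem.Set.ofList s = s.foldl PySem.Set.add [] := PySem.Set.ofList_eq_foldl s
  have hacc : pvOffsets.foldl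
      (fun acc d => acc.filter (fun v => s.contains (v.1 + d.1, v.2.1 + d.2.1, v.2.2 + d.2.2)))
      (PySem.Set.ofList s) = (PySem.Set.ofList s).filter (pvPred s) := by
    rw [pvFoldFilter]; rfl
  rw [hstep]
  show _ = (_, _)
  rw [hacc, pvFoldSplit]
  refine Prod.ext ?_ ?_
  · show _ = (PySem.Set.ofList s).filter (pvPred s)
    rw [hbase, pvFoldAddFilter]; rfl
  · show _ = PySem.Set.diff (PySem.Set.ofList s) ((PySem.Set.ofList s).filter (pvPred s))
    have hdiff : PySem.Set.diff (PySem.Set.ofList s) ((PySem.Set.ofList s).filter (pvPred s))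
        = (PySem.Set.ofList s).filter (fun v => !pvPred s v) := by
      simp only [PySem.Set.diff, PySem.Set.contains]
      exact List.filter_congr (fun v hv => by
        cases h : pvPred s v <;> simp [List.mem_filter, h, hv])
    rw [hdiff, hbase, pvFoldAddFilter]
    have hneg : (fun (a : List (Int × Int × Int)) v => if !pvPred s v then PySem.Set.add a v else a)
        = (fun a v => if pvPred s v then a else PySem.Set.add a v) := by
      funext a v; cases h : pvPred s v <;> simp
    rw [hneg]; rfl

-- ===== VERDICT (by name: the statement is the Claim_ definition above) =====
theorem cubical_interior_vertices_spec : Claim_equal_cubical_interior_vertices := by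
  intro s _
  show cubical_interior_vertices s = cubical_interior_vertices_alt s
  unfold cubical_interior_vertices cubical_interior_vertices_alt
  exact pvMainEq s
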